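-- pv_equiv track=rewrite | github.com/siliconflow/onediff | onediff_diffusers_extensions/onediffx/compilers/diffusion_pipeline_compiler.py | _filter_parts
-- ===== SOURCE A (Python) =====
-- _PARTS = [
--     "text_encoder",
--     "text_encoder_2",
--     "image_encoder",
--     "unet",
--     "controlnet",
--     "fast_unet",  # for deepcache
--     "prior",  # for StableCascadePriorPipeline
--     "decoder",  # for StableCascadeDecoderPipeline
--     "transformer",  # for Transformer-based DiffusionPipeline such as DiTPipeline and PixArtAlphaPipeline
--     "vqgan.down_blocks",  # for StableCascadeDecoderPipeline
--     "vqgan.up_blocks",  # for StableCascadeDecoderPipeline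
--     "vae.decoder",
--     "vae.encoder",
-- ]
--
-- def _filter_parts(ignores=()):
--     filtered_parts = []
--     for part in _PARTS:
--         skip = False
--         for ignore in ignores:
--             if part == ignore or part.startswith(ignore + "."):
--                 skip = True
--                 break
--         if not skip:
--             filtered_parts.append(part)
--
--     return filtered_parts
-- ===== SOURCE B (Python) =====
-- _PARTS = [
--     "text_encoder",
--     "text_encoder_2",
--     "image_encoder",
--     "unet",
--     "controlnet",
--     "fast_unet",  # for deepcache
--     "prior",  # for StableCascadePriorPipeline
--     "decoder",  # for StableCascadeDecoderPipeline
--     "transformer",  # for Transformer-based DiffusionPipeline such as DiTPipeline and PixArtAlphaPipeline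
--     "vqgan.down_blocks",  # for StableCascadeDecoderPipeline
--     "vqgan.up_blocks",  # for StableCascadeDecoderPipeline
--     "vae.decoder",
--     "vae.encoder",
-- ]
--
--
-- def _dot_prefixes(part):
--     segs = part.split(".")
--     prefs = [segs[0]]
--     for seg in segs[1:]:
--         prefs.append(prefs[-1] + "." + seg)
--     return prefs
--
--
-- def _filter_parts(ignores=()):
--     ignore_set = set(ignores)
--     return [part for part in _PARTS
--             if ignore_set.isdisjoint(_dot_prefixes(part))]
-- ===== Notes on version B (the rewrite author's own statement) =====
-- stated objective: faster
-- what changed: Instead of scanning the ignore list per part with equality/startswith tests, B materializes the ignores as a set once and keeps a part iff the set is disjoint from the part's own dot-boundary prefixes (e.g. 'vae', 'vae.decoder'), so the inner scan over ignores disappears.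
import Mathlib
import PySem

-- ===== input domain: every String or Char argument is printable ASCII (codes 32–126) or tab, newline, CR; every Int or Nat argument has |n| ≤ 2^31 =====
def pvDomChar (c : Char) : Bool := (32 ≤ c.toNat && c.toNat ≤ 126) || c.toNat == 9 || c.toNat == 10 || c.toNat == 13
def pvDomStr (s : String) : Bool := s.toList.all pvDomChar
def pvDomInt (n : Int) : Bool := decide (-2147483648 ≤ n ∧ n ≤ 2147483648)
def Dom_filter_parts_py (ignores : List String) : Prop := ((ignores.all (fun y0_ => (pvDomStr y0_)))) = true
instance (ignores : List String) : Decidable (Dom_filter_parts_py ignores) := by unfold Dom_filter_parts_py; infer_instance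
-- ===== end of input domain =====

-- B replaces A's inner scan over `ignores` with startswith by a one-shot ignore set tested
-- against each part's dot-boundary prefixes (objective: simpler / alternative decomposition).

def pyPARTS : List String :=
  ["text_encoder", "text_encoder_2", "image_encoder", "unet", "controlnet",
   "fast_unet", "prior", "decoder", "transformer", "vqgan.down_blocks",
   "vqgan.up_blocks", "vae.decoder", "vae.encoder"]

-- ===== PORT A =====
-- outer loop appends `part` unless the inner loop set `skip`;
-- the inner for/break computing `skip` is exactly a short-circuit `any`.
def filter_parts_py (ignores : List String) : List String :=
  pyPARTS.foldl
    (fun filtered_parts part =>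
      let skip := ignores.any (fun ignore =>
        part == ignore || PySem.Str.startswith part (ignore ++ "."))
      if skip then filtered_parts else filtered_parts ++ [part])
    []

-- ===== PORT B =====
-- part.split("."): sep is the literal nonempty ".", so Str.split? is always `some`.
def dotPrefixesStr (part : String) : List String :=
  match (PySem.Str.split? part ".").getD [] with
  | [] => []
  | s0 :: rest =>
    (rest.foldl (fun (prefs : List String × String) seg =>
      (prefs.1 ++ [prefs.2 ++ "." ++ seg], prefs.2 ++ "." ++ seg)) ([s0], s0)).1

def filter_parts_py_alt (ignores : List String) : List String :=
  pyPARTS.filter (fun part =>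
    PySem.Set.isdisjoint (PySem.Set.ofList ignores) (dotPrefixesStr part))

-- ===== PRECONDITION & SPEC =====
def Spec_filter_parts_py (ignores : List String) (out : List String) : Prop := out = filter_parts_py_alt ignores
instance (ignores : List String) (out : List String) : Decidable (Spec_filter_parts_py ignores out) := by unfold Spec_filter_parts_py; infer_instance

-- ===== CLAIM (what is proved, stated in full; the proofs are below) =====
def Claim_equal_filter_parts_py : Prop := ∀ (ignores : List String), Dom_filter_parts_py ignores → Spec_filter_parts_py ignores (filter_parts_py ignores)

-- ===== LEMMAS AND PROOFS =====

-- the prefixes of cs that end right before a '.' (as char lists)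
def dotStops : List Char → List (List Char)
  | [] => []
  | c :: cs => (if c = '.' then [[]] else []) ++ (dotStops cs).map (c :: ·)

theorem append_dot_prefix_iff (l cs : List Char) :
    (l ++ ['.']) <+: cs ↔ l ∈ dotStops cs := by
  induction cs generalizing l with
  | nil =>
    simp only [List.prefix_nil, dotStops, List.not_mem_nil, iff_false]
    intro h
    exact absurd (congrArg List.length h) (by simp)
  | cons c cs ih =>
    cases l with
    | nil =>
      simp only [List.nil_append, List.cons_prefix_cons, List.nil_prefix, and_true, dotStops,
        List.mem_append, List.mem_map]
      constructor
      · rintro rfl; simp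
      · rintro (h | ⟨b, _, h⟩)
        · split_ifs at h with hc
          · exact hc.symm
          · simp at h
        · simp at h
    | cons a l =>
      simp only [List.cons_append, List.cons_prefix_cons, ih, dotStops, List.mem_append,
        List.mem_map]
      constructor
      · rintro ⟨rfl, h⟩; right; exact ⟨l, h, rfl⟩
      · rintro (h | ⟨b, hb, h⟩)
        · split_ifs at h with hc
          · simp at h
          · simp at h
        · injection h with h1 h2
          subst h1; subst h2
          exact ⟨rfl, hb⟩

-- A's per-ignore test, for one fixed part, matches exactly the dot-boundary prefixes.
theorem matchA_iff (part s : String) :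
    (part == s || PySem.Str.startswith part (s ++ ".")) = true ↔
      s.toList = part.toList ∨ s.toList ∈ dotStops part.toList := by
  have h1 : (part == s) = true ↔ s.toList = part.toList := by
    rw [beq_iff_eq, String.toList_inj, eq_comm]
  have h2 : PySem.Str.startswith part (s ++ ".") = true ↔ s.toList ∈ dotStops part.toList := by
    rw [show PySem.Str.startswith part (s ++ ".") = true ↔ (s ++ ".").toList <+: part.toList by
      simp [pysem]]
    rw [String.toList_append]
    exact append_dot_prefix_iff _ _
  rw [Bool.or_eq_true, h1, h2]

-- for a part whose dot-boundary proper prefixes (as strings) are `stops` and whose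
-- B-side prefix list is `stops ++ [part]`, A's test is membership in that prefix list
theorem matchA_mem (part s : String) (stops : List String)
    (h1 : dotStops part.toList = stops.map String.toList)
    (h2 : dotPrefixesStr part = stops ++ [part]) :
    (part == s || PySem.Str.startswith part (s ++ ".")) = true ↔ s ∈ dotPrefixesStr part := by
  rw [matchA_iff, h1, h2, List.mem_append, List.mem_singleton, List.mem_map]
  constructor
  · rintro (h | ⟨t, ht, hts⟩)
    · exact Or.inr (String.toList_inj.mp h)
    · exact Or.inl (String.toList_inj.mp hts ▸ ht)
  · rintro (h | rfl)
    · exact Or.inr ⟨s, h, rfl⟩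
    · exact Or.inl rfl

-- A's skip flag equals the negation of B's disjointness test
theorem cond_eq (ignores : List String) (part : String)
    (hmem : ∀ s : String,
      (part == s || PySem.Str.startswith part (s ++ ".")) = true ↔ s ∈ dotPrefixesStr part) :
    (ignores.any (fun ignore =>
        part == ignore || PySem.Str.startswith part (ignore ++ "."))) =
      !PySem.Set.isdisjoint (PySem.Set.ofList ignores) (dotPrefixesStr part) := by
  rcases h : PySem.Set.isdisjoint (PySem.Set.ofList ignores) (dotPrefixesStr part) with _ | _
  · simp only [Bool.not_false]
    have hex : ∃ x ∈ PySem.Set.ofList ignores, x ∈ dotPrefixesStr part := by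
      by_contra hc
      push Not at hc
      rw [(PySem.Set.isdisjoint_iff _ _).mpr hc] at h
      exact absurd h (by simp)
    obtain ⟨x, hx1, hx2⟩ := hex
    rw [List.any_eq_true]
    exact ⟨x, (PySem.Set.mem_ofList _ _).mp hx1, (hmem x).mpr hx2⟩
  · simp only [Bool.not_true]
    rw [List.any_eq_false]
    intro x hx hmatch
    exact (PySem.Set.isdisjoint_iff _ _).mp h x ((PySem.Set.mem_ofList _ _).mpr hx)
      ((hmem x).mp hmatch)

theorem filter_parts_py_spec : Claim_equal_filter_parts_py := by
  intro ignores _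
  show filter_parts_py ignores = filter_parts_py_alt ignores
  unfold filter_parts_py filter_parts_py_alt
  have hfun : (fun (filtered_parts : List String) (part : String) =>
      let skip := ignores.any (fun ignore =>
        part == ignore || PySem.Str.startswith part (ignore ++ "."))
      if skip then filtered_parts else filtered_parts ++ [part]) =
      (fun filtered_parts part =>
        if (!ignores.any (fun ignore =>
          part == ignore || PySem.Str.startswith part (ignore ++ "."))) then
          filtered_parts ++ [id part] else filtered_parts) := by
    funext acc part
    cases ignores.any (fun ignore =>
      part == ignore || PySem.Str.startswith part (ignore ++ ".")) <;> simp
  rw [hfun, PySem.List.foldl_append_if _ id, List.nil_append, List.map_id]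
  apply List.filter_congr
  intro part hpart
  have step : ∀ stops : List String,
      dotStops part.toList = stops.map String.toList →
      dotPrefixesStr part = stops ++ [part] →
      (!ignores.any (fun ignore =>
        part == ignore || PySem.Str.startswith part (ignore ++ "."))) =
        PySem.Set.isdisjoint (PySem.Set.ofList ignores) (dotPrefixesStr part) := by
    intro stops h1 h2
    rw [cond_eq ignores part (fun s => matchA_mem part s stops h1 h2), Bool.not_not]
  fin_cases hpart
  · exact step [] (by decide) (by decide)
  · exact step [] (by decide) (by decide)
  · exact step [] (by decide) (by decide)
  · exact step [] (by decide) (by decide)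
  · exact step [] (by decide) (by decide)
  · exact step [] (by decide) (by decide)
  · exact step [] (by decide) (by decide)
  · exact step [] (by decide) (by decide)
  · exact step [] (by decide) (by decide)
  · exact step ["vqgan"] (by decide) (by decide)
  · exact step ["vqgan"] (by decide) (by decide)
  · exact step ["vae"] (by decide) (by decide)
  · exact step ["vae"] (by decide) (by decide)
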